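-- pv_equiv track=rewrite | github.com/unicode-org/conformance | verifier/testreport.py | combine_same_sets_of_labels
-- ===== SOURCE A (Python) =====
-- def combine_same_sets_of_labels(label_sets):
--     # TODO: Combine sets that have the same group of labels.
--     # Group by length of label list
--     if not label_sets:
--         return label_sets
--     keys = label_sets.keys()
--     # A list of combined names and sets of labels
--     combined_sets = []
--     for key in keys:
--         set = label_sets[key]
--         merged = False
--         for combined in combined_sets:
--             if set == combined[1]:
--                 combined[0].append(key)
--                 merged = True
--                 continue
--         if not merged:
--             combined_sets.append([[key], set])
--     # TODO: Create new dictionary with combined keys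
--     combined_dictionary = {}
--     for set in combined_sets:
--         key = (', ').join(set[0])
--         combined_dictionary[key] = set[1]
--
--     return combined_dictionary
-- ===== SOURCE B (Python) =====
-- def combine_same_sets_of_labels(label_sets):
--     if not label_sets:
--         return label_sets
--     # One pass: group keys by a canonical (sorted-tuple) form of their value set.
--     groups = {}  # canonical tuple -> [names, original_set]
--     for key, val in label_sets.items():
--         canon = tuple(sorted(val))
--         g = groups.get(canon)
--         if g is None:
--             groups[canon] = [[key], val]
--         else:
--             g[0].append(key)
--     return {", ".join(names): val for names, val in groups.values()}
-- ===== Notes on version B (the rewrite author's own statement) =====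
-- stated objective: faster
-- what changed: Replaces A's quadratic scan of already-built groups (list-of-lists with set comparison per element) by a single pass that groups keys in a dictionary keyed by a canonical (sorted tuple) form of each value set.
import Mathlib
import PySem

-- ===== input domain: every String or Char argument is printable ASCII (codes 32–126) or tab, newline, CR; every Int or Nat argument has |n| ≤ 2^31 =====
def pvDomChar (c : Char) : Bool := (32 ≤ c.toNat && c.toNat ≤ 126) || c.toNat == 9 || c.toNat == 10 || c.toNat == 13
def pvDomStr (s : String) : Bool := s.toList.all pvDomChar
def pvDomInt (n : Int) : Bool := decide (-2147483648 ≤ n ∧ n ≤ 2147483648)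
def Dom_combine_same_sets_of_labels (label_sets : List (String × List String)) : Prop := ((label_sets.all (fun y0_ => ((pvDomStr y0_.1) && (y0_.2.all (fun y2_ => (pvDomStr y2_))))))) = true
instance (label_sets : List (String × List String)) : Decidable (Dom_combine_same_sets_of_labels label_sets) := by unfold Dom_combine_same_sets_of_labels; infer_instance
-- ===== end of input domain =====

-- B replaces A's quadratic group-list scan by one dict pass keyed by a canonical sorted form of each value set (faster, asymptotic).
-- The values of the input dict are Python sets (set[str]): the List String values are PySem.Set lists and '==' on them is Set.equal.

-- ===== PORT A =====
def combine_same_sets_of_labels (label_sets : List (String × List String)) : List (String × List String) :=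
  if label_sets = [] then label_sets else
  let d := PySem.Dict.ofList label_sets
  -- for key in keys: set = label_sets[key]  (KeyError impossible: key ∈ d.keys, so getD's default is never used)
  let combined := d.keys.foldl (fun cs key =>
      let v := d.getD key []
      -- inner 'for combined in combined_sets': append key to every group whose set equals v; merged = any match
      let merged := cs.any (fun c => PySem.Set.equal v c.2)
      let cs := cs.map (fun c => if PySem.Set.equal v c.2 then (c.1 ++ [key], c.2) else c)
      if !merged then cs ++ [([key], v)] else cs) []
  (combined.foldl (fun out c => out.insert (PySem.Str.join ", " c.1) c.2)
    (PySem.Dict.empty : PySem.Dict String (List String))).items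

-- ===== PORT B =====
-- canonical form of a value set: tuple(sorted(val))  (val is a Python set, i.e. its distinct elements)
def pvCanon (v : List String) : List String :=
  PySem.List.sorted (PySem.Set.ofList v) (fun x => x) false

def combine_same_sets_of_labels_alt (label_sets : List (String × List String)) : List (String × List String) :=
  if label_sets = [] then label_sets else
  let d := PySem.Dict.ofList label_sets
  let groups := d.items.foldl (fun g p =>
      let k := pvCanon p.2
      match g.get? k with
      | none => g.insert k ([p.1], p.2)
      | some c => g.insert k (c.1 ++ [p.1], c.2))
    (PySem.Dict.empty : PySem.Dict (List String) (List String × List String))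
  (groups.values.foldl (fun out c => out.insert (PySem.Str.join ", " c.1) c.2)
    (PySem.Dict.empty : PySem.Dict String (List String))).items

-- ===== PRECONDITION & SPEC =====
def Spec_combine_same_sets_of_labels (label_sets : List (String × List String)) (out : List (String × List String)) : Prop := out = combine_same_sets_of_labels_alt label_sets
instance (label_sets : List (String × List String)) (out : List (String × List String)) : Decidable (Spec_combine_same_sets_of_labels label_sets out) := by unfold Spec_combine_same_sets_of_labels; infer_instance

-- ===== CLAIM (what is proved, stated in full; the proofs are below) =====
def Claim_equal_combine_same_sets_of_labels : Prop := ∀ (label_sets : List (String × List String)), Dom_combine_same_sets_of_labels label_sets → Spec_combine_same_sets_of_labels label_sets (combine_same_sets_of_labels label_sets)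

-- ===== LEMMAS AND PROOFS =====

lemma set_equal_iff_canon (v w : List String) :
    PySem.Set.equal v w = true ↔ pvCanon v = pvCanon w := by
  rw [PySem.Set.equal_iff]
  unfold pvCanon
  rw [PySem.List.sorted_id_eq_sorted_id_iff_perm]
  rw [List.perm_ext_iff_of_nodup (PySem.Set.nodup_ofList v) (PySem.Set.nodup_ofList w)]
  simp [PySem.Set.mem_ofList]


lemma loop_eq (pairs : List (String × List String))
    (g : PySem.Dict (List String) (List String × List String))
    (hcanon : ∀ p ∈ g.items, p.1 = pvCanon p.2.2) (hnd : g.keys.Nodup) :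
    pairs.foldl (fun cs p =>
      let v := p.2
      let merged := cs.any (fun c => PySem.Set.equal v c.2)
      let cs := cs.map (fun c => if PySem.Set.equal v c.2 then (c.1 ++ [p.1], c.2) else c)
      if !merged then cs ++ [([p.1], v)] else cs) g.values
    = (pairs.foldl (fun g p =>
        let k := pvCanon p.2
        match g.get? k with
        | none => g.insert k ([p.1], p.2)
        | some c => g.insert k (c.1 ++ [p.1], c.2)) g).values := by
  induction pairs generalizing g with
  | nil => rfl
  | cons p pairs ih =>
    simp only [List.foldl_cons]
    have hmem : ∀ q ∈ g.items, (PySem.Set.equal p.2 q.2.2 = true) ↔ q.1 = pvCanon p.2 := by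
      intro q hq
      rw [set_equal_iff_canon, ← hcanon q hq]
      exact eq_comm
    cases h : g.get? (pvCanon p.2) with
    | none =>
      have hcont : g.contains (pvCanon p.2) = false := by
        rw [PySem.Dict.contains_eq_isSome_get?, h]; rfl
      have hno : ∀ q ∈ g.items, PySem.Set.equal p.2 q.2.2 = false := by
        intro q hq
        by_contra hne
        have : q.1 = pvCanon p.2 := (hmem q hq).1 (by simpa using hne)
        have : g.contains (pvCanon p.2) = true := by
          rw [PySem.Dict.contains_iff_mem_keys]
          exact this ▸ PySem.Dict.mem_keys_of_mem_items _ hq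
        simp [this] at hcont
      have hmerged : g.values.any (fun c => PySem.Set.equal p.2 c.2) = false := by
        simp only [PySem.Dict.values, List.any_map]
        rw [List.any_eq_false]
        intro q hq; simp [hno q hq]
      have hmap : g.values.map (fun c => if PySem.Set.equal p.2 c.2 then (c.1 ++ [p.1], c.2) else c) = g.values := by
        rw [List.map_congr_left (g := id), List.map_id]
        intro c hc
        simp only [PySem.Dict.values] at hc
        obtain ⟨q, hq, rfl⟩ := List.mem_map.1 hc
        simp [hno q hq]
      have hvals : (g.insert (pvCanon p.2) ([p.1], p.2)).values = g.values ++ [([p.1], p.2)] := by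
        simp only [PySem.Dict.values, PySem.Dict.items_insert_of_not_contains _ _ hcont,
          List.map_append, List.map_cons, List.map_nil]
      simp only [hmerged, hmap, Bool.not_false, if_true]
      rw [← hvals]
      refine ih _ ?_ ?_
      · intro q hq
        rw [PySem.Dict.items_insert_of_not_contains _ _ hcont] at hq
        rcases List.mem_append.1 hq with hq | hq
        · exact hcanon q hq
        · simp at hq; subst hq; rfl
      · exact PySem.Dict.nodup_keys_insert _ _ _ hnd
    | some c =>
      have hkc : (pvCanon p.2, c) ∈ g.items := PySem.Dict.mem_items_of_get?_eq_some _ h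
      have hcont : g.contains (pvCanon p.2) = true := by
        rw [PySem.Dict.contains_eq_isSome_get?, h]; rfl
      have hmerged : g.values.any (fun c => PySem.Set.equal p.2 c.2) = true := by
        simp only [PySem.Dict.values, List.any_map]
        rw [List.any_eq_true]
        exact ⟨(pvCanon p.2, c), hkc, by simp [(hmem _ hkc).2 rfl]⟩
      have hvals : g.values.map (fun c => if PySem.Set.equal p.2 c.2 then (c.1 ++ [p.1], c.2) else c)
          = (g.insert (pvCanon p.2) (c.1 ++ [p.1], c.2)).values := by
        simp only [PySem.Dict.values, PySem.Dict.items_insert_of_contains _ _ hcont,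
          List.map_map, List.map_map]
        symm
        rw [List.map_congr_left]
        intro q hq
        by_cases hqk : q.1 = pvCanon p.2
        · have h2 : g.get? q.1 = some q.2 := PySem.Dict.get?_of_mem_items _ hq hnd
          rw [hqk, h] at h2
          have hq2 : q.2 = c := (Option.some.inj h2).symm
          have heq : PySem.Set.equal p.2 q.2.2 = true := (hmem q hq).2 hqk
          simp only [Function.comp]
          rw [if_pos (show (q.1 == pvCanon p.2) = true by simp [hqk]), if_pos heq, hq2]
        · have : PySem.Set.equal p.2 q.2.2 = false := by
            by_contra hne
            exact hqk ((hmem q hq).1 (by simpa using hne))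
          simp [Function.comp, hqk, this]
      simp only [hmerged, Bool.not_true, Bool.false_eq_true, if_false]
      rw [hvals]
      refine ih _ ?_ ?_
      · intro q hq
        rw [PySem.Dict.items_insert_of_contains _ _ hcont] at hq
        obtain ⟨r, hr, hrq⟩ := List.mem_map.1 hq
        by_cases hrk : r.1 == pvCanon p.2
        · simp only [hrk, if_true] at hrq
          subst hrq
          exact hcanon (pvCanon p.2, c) hkc
        · simp only [hrk] at hrq
          subst hrq
          exact hcanon r hr
      · exact PySem.Dict.nodup_keys_insert _ _ _ hnd

-- ===== VERDICT (by name: the statement is the Claim_ definition above) =====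
theorem combine_same_sets_of_labels_spec : Claim_equal_combine_same_sets_of_labels := by
  intro label_sets _
  unfold Spec_combine_same_sets_of_labels combine_same_sets_of_labels combine_same_sets_of_labels_alt
  by_cases hnil : label_sets = []
  · simp [hnil]
  · simp only [hnil, if_false]
    set d := PySem.Dict.ofList label_sets with hd
    congr 2
    have hkeys : d.items = d.keys.map (fun k => (k, d.getD k [])) :=
      PySem.Dict.items_eq_map_keys d (PySem.Dict.nodup_keys_ofList label_sets) []
    have hmain := loop_eq d.items PySem.Dict.empty (by intro q hq; cases hq) (by simp)
    rw [show (PySem.Dict.empty : PySem.Dict (List String) (List String × List String)).values = [] from rfl] at hmain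
    rw [← hmain, hkeys, List.foldl_map]
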